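-- pv_equiv track=rewrite | github.com/jdb/papillon | solutions/asia/intervals.py | merge_streams
-- ===== SOURCE A (Python) =====
-- def order(interval1, interval2):
--     """Returns True when intervals are in a good order"""
--     return interval1[0] < interval2[0]
--
-- def merge_streams(stream1, stream2):
--     """Yields intervals from each of the input sorted stream, in order."""
--
--     a, b = 0, 0
--
--     # for i in range(0, (len(stream1)+len(stream2))):
--     while True:
--         if len(stream1) == 0:
--             c = 2
--             break
--         if len(stream2) == 0:
--             c = 1
--             break
--
--         if order(stream1[a], stream2[b]):
--             yield stream1[a]
--             a += 1
--             if a == len(stream1):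
--                 c = 2
--                 break
--         else:
--             yield stream2[b]
--             b += 1
--             if b == len(stream2):
--                 c = 1
--                 break
--
--     if c == 1:
--         for i in range(a, len(stream1)):
--             yield stream1[i]
--
--     if c == 2:
--         for i in range(b, len(stream2)):
--             yield stream2[i]
-- ===== SOURCE B (Python) =====
-- def merge_streams(stream1, stream2):
--     """Yields intervals from each of the input sorted stream, in order."""
--     xs = list(reversed(stream1))
--     ys = list(reversed(stream2))
--     while xs and ys:
--         yield xs.pop() if xs[-1][0] < ys[-1][0] else ys.pop()
--     yield from reversed(xs)
--     yield from reversed(ys)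
-- ===== Notes on version B (the rewrite author's own statement) =====
-- stated objective: simpler
-- what changed: Replaces the index-cursor while-loop with a break flag c, a helper order() and two tail for-loops by a short loop that destructively pops from two reversed stacks and flushes both tails uniformly; same merge order, plainer decomposition.
import Mathlib
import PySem

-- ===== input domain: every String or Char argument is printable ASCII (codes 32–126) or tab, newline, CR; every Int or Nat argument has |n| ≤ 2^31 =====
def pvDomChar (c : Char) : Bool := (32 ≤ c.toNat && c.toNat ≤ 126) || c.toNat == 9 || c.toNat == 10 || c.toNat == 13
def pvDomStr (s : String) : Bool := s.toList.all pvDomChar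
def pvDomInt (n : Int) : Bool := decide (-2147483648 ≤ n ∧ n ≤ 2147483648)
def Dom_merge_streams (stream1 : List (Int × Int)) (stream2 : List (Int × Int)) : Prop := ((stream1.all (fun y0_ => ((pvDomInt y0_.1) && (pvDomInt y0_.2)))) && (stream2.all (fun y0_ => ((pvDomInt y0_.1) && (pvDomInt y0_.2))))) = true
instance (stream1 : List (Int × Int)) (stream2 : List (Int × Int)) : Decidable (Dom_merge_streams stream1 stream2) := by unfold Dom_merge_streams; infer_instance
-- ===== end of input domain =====

-- B replaces A's cursor-and-break-flag loop (plus two tail for-loops) by one short loop that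
-- pops from two reversed stacks; equal on every input.  Both Pythons are generators; the
-- equivalence is about the list of yielded values.

-- ===== PORT A =====
-- helper `order(i1, i2)` of A
def pvOrder (interval1 interval2 : Int × Int) : Bool := interval1.1 < interval2.1

-- A's `while True` loop over cursors a, b, fused with the two trailing `for` loops that the
-- break flag c selects (c = 1 yields stream1[a:], c = 2 yields stream2[b:]).  The dite guards
-- `ha`/`hb` only witness that the Python index access is in range (it always is when the loop
-- body runs); the `[]` branches are unreachable from merge_streams.
def pvLoopA (s1 s2 : List (Int × Int)) (a b : Nat) : List (Int × Int) :=
  if s1.length = 0 then s2.drop b               -- c = 2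
  else if s2.length = 0 then s1.drop a          -- c = 1
  else if ha : a < s1.length then
    if hb : b < s2.length then
      if pvOrder s1[a] s2[b] then
        if a + 1 = s1.length then s1[a] :: s2.drop b        -- yield, a += 1, break with c = 2
        else s1[a] :: pvLoopA s1 s2 (a + 1) b
      else
        if b + 1 = s2.length then s2[b] :: s1.drop a        -- yield, b += 1, break with c = 1
        else s2[b] :: pvLoopA s1 s2 a (b + 1)
    else []
  else []
termination_by (s1.length - a) + (s2.length - b)
decreasing_by all_goals omega

def merge_streams (stream1 : List (Int × Int)) (stream2 : List (Int × Int)) : List (Int × Int) :=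
  pvLoopA stream1 stream2 0 0

-- ===== PORT B =====
-- B's `while xs and ys` loop: xs, ys are the two reversed stacks, xs[-1]/ys[-1] is `getLast`
-- (the stacks are nonempty exactly when the dite guards fail), `pop()` is `dropLast`, and the
-- two `yield from reversed(...)` tail flushes are the `xs.reverse ++ ys.reverse` exits (one
-- of the two reverses is of the empty list there).
def pvLoopB (xs ys : List (Int × Int)) : List (Int × Int) :=
  if hx : xs = [] then xs.reverse ++ ys.reverse
  else if hy : ys = [] then xs.reverse ++ ys.reverse
  else
    if (xs.getLast hx).1 < (ys.getLast hy).1 then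
      xs.getLast hx :: pvLoopB xs.dropLast ys
    else
      ys.getLast hy :: pvLoopB xs ys.dropLast
termination_by xs.length + ys.length
decreasing_by
  · have := List.length_pos_of_ne_nil hx
    simp [List.length_dropLast]; omega
  · have := List.length_pos_of_ne_nil hy
    simp [List.length_dropLast]; omega

-- xs = list(reversed(stream1)); ys = list(reversed(stream2)); then the loop
def merge_streams_alt (stream1 : List (Int × Int)) (stream2 : List (Int × Int)) : List (Int × Int) :=
  pvLoopB stream1.reverse stream2.reverse

-- ===== PRECONDITION & SPEC =====
def Spec_merge_streams (stream1 : List (Int × Int)) (stream2 : List (Int × Int)) (out : List (Int × Int)) : Prop := out = merge_streams_alt stream1 stream2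
instance (stream1 : List (Int × Int)) (stream2 : List (Int × Int)) (out : List (Int × Int)) : Decidable (Spec_merge_streams stream1 stream2 out) := by unfold Spec_merge_streams; infer_instance

-- ===== CLAIM (what is proved, stated in full; the proofs are below) =====
def Claim_equal_merge_streams : Prop := ∀ (stream1 : List (Int × Int)) (stream2 : List (Int × Int)), Dom_merge_streams stream1 stream2 → Spec_merge_streams stream1 stream2 (merge_streams stream1 stream2)

-- ===== LEMMAS AND PROOFS =====

-- The plain recursive merge (ties go to the second list), the common meeting point of the
-- two ports: A's loop computes it on the dropped suffixes, B's loop on the reversed stacks.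
def pvMrg : List (Int × Int) → List (Int × Int) → List (Int × Int)
  | [], ys => ys
  | x :: xs, [] => x :: xs
  | x :: xs, y :: ys =>
    if x.1 < y.1 then x :: pvMrg xs (y :: ys) else y :: pvMrg (x :: xs) ys

lemma pvMrg_nil_left (ys : List (Int × Int)) : pvMrg [] ys = ys := by
  rw [pvMrg]

lemma pvMrg_nil_right (xs : List (Int × Int)) : pvMrg xs [] = xs := by
  cases xs with
  | nil => rw [pvMrg]
  | cons x xs => rw [pvMrg]

lemma pvMrg_cons_cons (x y : Int × Int) (xs ys : List (Int × Int)) :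
    pvMrg (x :: xs) (y :: ys)
      = if x.1 < y.1 then x :: pvMrg xs (y :: ys) else y :: pvMrg (x :: xs) ys := by
  rw [pvMrg]

-- A's loop is the recursive merge of the two suffixes
lemma pvLoopA_eq_mrg (s1 s2 : List (Int × Int)) :
    ∀ a b : Nat, a < s1.length → b < s2.length →
      pvLoopA s1 s2 a b = pvMrg (s1.drop a) (s2.drop b) := by
  intro a b ha hb
  fun_induction pvLoopA s1 s2 a b with
  | case1 a b h => omega
  | case2 a b h1 h2 => omega
  | case3 a b h1 h2 ha' hb' hcmp hlast =>
      have hd : s1.drop (a + 1) = [] := by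
        rw [List.drop_eq_nil_iff]; omega
      simp only [pvOrder, decide_eq_true_eq] at hcmp
      rw [List.drop_eq_getElem_cons ha', List.drop_eq_getElem_cons hb', pvMrg_cons_cons,
        if_pos hcmp, hd, pvMrg_nil_left, ← List.drop_eq_getElem_cons hb']
  | case4 a b h1 h2 ha' hb' hcmp hlast ih =>
      simp only [pvOrder, decide_eq_true_eq] at hcmp
      rw [ih (by omega) hb', List.drop_eq_getElem_cons ha', List.drop_eq_getElem_cons hb',
        pvMrg_cons_cons, if_pos hcmp]
  | case5 a b h1 h2 ha' hb' hcmp hlast =>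
      have hd : s2.drop (b + 1) = [] := by
        rw [List.drop_eq_nil_iff]; omega
      simp only [pvOrder, decide_eq_true_eq] at hcmp
      rw [List.drop_eq_getElem_cons ha', List.drop_eq_getElem_cons hb', pvMrg_cons_cons,
        if_neg hcmp, hd, pvMrg_nil_right, ← List.drop_eq_getElem_cons ha']
  | case6 a b h1 h2 ha' hb' hcmp hlast ih =>
      simp only [pvOrder, decide_eq_true_eq] at hcmp
      rw [ih ha' (by omega), List.drop_eq_getElem_cons ha', List.drop_eq_getElem_cons hb',
        pvMrg_cons_cons, if_neg hcmp]
  | case7 a b h1 h2 ha' hb' => omega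
  | case8 a b h1 h2 ha' => omega

-- B's loop, read on the stacks in last-in-first-out form
lemma pvLoopB_nil_left (ys : List (Int × Int)) : pvLoopB [] ys = ys.reverse := by
  rw [pvLoopB]; simp

lemma pvLoopB_nil_right (xs : List (Int × Int)) : pvLoopB xs [] = xs.reverse := by
  rw [pvLoopB]; by_cases hx : xs = [] <;> simp [hx]

lemma pvLoopB_concat_concat (xs ys : List (Int × Int)) (x y : Int × Int) :
    pvLoopB (xs ++ [x]) (ys ++ [y])
      = if x.1 < y.1 then x :: pvLoopB xs (ys ++ [y]) else y :: pvLoopB (xs ++ [x]) ys := by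
  rw [pvLoopB]
  simp

-- B's loop on the reversed inputs is the recursive merge
lemma pvLoopB_eq_mrg : ∀ (n : Nat) (l1 l2 : List (Int × Int)), l1.length + l2.length ≤ n →
    pvLoopB l1.reverse l2.reverse = pvMrg l1 l2 := by
  intro n
  induction n with
  | zero =>
      intro l1 l2 h
      have h1 : l1 = [] := by cases l1 <;> simp_all
      have h2 : l2 = [] := by cases l2 <;> simp_all
      subst h1; subst h2
      simp only [List.reverse_nil]
      rw [pvLoopB_nil_left, pvMrg_nil_left, List.reverse_nil]
  | succ n ih =>
      intro l1 l2 h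
      cases l1 with
      | nil =>
          simp only [List.reverse_nil]
          rw [pvLoopB_nil_left, pvMrg_nil_left, List.reverse_reverse]
      | cons p l1' =>
          cases l2 with
          | nil =>
              simp only [List.reverse_nil]
              rw [pvLoopB_nil_right, pvMrg_nil_right, List.reverse_reverse]
          | cons q l2' =>
              rw [List.reverse_cons, List.reverse_cons, pvLoopB_concat_concat,
                pvMrg_cons_cons, ← List.reverse_cons, ← List.reverse_cons]
              simp only [List.length_cons] at h
              by_cases hpq : p.1 < q.1
              · rw [if_pos hpq, if_pos hpq, ih l1' (q :: l2') (by simp; omega)]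
              · rw [if_neg hpq, if_neg hpq, ih (p :: l1') l2' (by simp; omega)]

-- ===== VERDICT (by name: the statement is the Claim_ definition above) =====
theorem merge_streams_spec : Claim_equal_merge_streams := by
  intro s1 s2 _
  unfold Spec_merge_streams merge_streams merge_streams_alt
  rw [pvLoopB_eq_mrg (s1.length + s2.length) s1 s2 le_rfl]
  match s1, s2 with
  | [], s2 => rw [pvLoopA]; simp [pvMrg_nil_left]
  | x :: s1, [] => rw [pvLoopA]; simp [pvMrg_nil_right]
  | x :: s1, y :: s2 =>
      rw [pvLoopA_eq_mrg _ _ 0 0 (by simp) (by simp)]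
      simp
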